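-- pv_equiv track=rewrite | github.com/CollegeBoreal/INF1102-201-26H-03 | 8.Project/300133071/scripts/analyse.py | generate_interpretation
-- ===== SOURCE A (Python) =====
-- def generate_interpretation(top_words: list[str], site_label: str) -> list[str]:
--     """
--     Génère une interprétation textuelle automatique des mots dominants.
--
--     On associe des thèmes aux mots-clés pour déduire les grandes
--     catégories de sujets traités par le site ce jour-là.
--
--     Args:
--         top_words:  Les 10 mots les plus fréquents.
--         site_label: Nom du site.
--
--     Returns:
--         Liste de phrases d'interprétation.
--     """
--     themes = {
--         "politique":   {"government","president","minister","party","election","vote","senate","congress","parliament"},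
--         "économie":    {"economy","market","price","inflation","trade","growth","recession","dollar","bank","stock"},
--         "conflit":     {"war","attack","military","troops","conflict","ukraine","russia","israel","gaza","killed"},
--         "santé":       {"health","hospital","disease","vaccine","covid","cancer","treatment","medical","drug"},
--         "technologie": {"ai","technology","data","digital","cyber","software","tech","internet","robot","model"},
--         "climate":     {"climate","weather","fire","flood","storm","carbon","energy","environment","pollution"},
--         "sport":       {"game","team","player","win","match","league","championship","olympic","score"},
--     }
--
--     detected = []
--     for theme, keywords in themes.items():
--         if keywords.intersection(top_words):
--             detected.append(theme)
--
--     lines = [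
--         f"Les actualités de {site_label} ce jour portent principalement sur :",
--         "",
--     ]
--
--     if detected:
--         for theme in detected:
--             lines.append(f"  • {theme.capitalize()}")
--     else:
--         lines.append("  • Sujets variés (aucun thème dominant identifié)")
--
--     lines += [
--         "",
--         "Cette analyse est basée sur la fréquence des mots dans les",
--         "titres et résumés des articles. Les résultats reflètent",
--         "les préoccupations éditoriales du site à ce moment précis.",
--     ]
--
--     return lines
-- ===== SOURCE B (Python) =====
-- _TABLE = [
--     ("Politique",   "government president minister party election vote senate congress parliament"),
--     ("Économie",    "economy market price inflation trade growth recession dollar bank stock"),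
--     ("Conflit",     "war attack military troops conflict ukraine russia israel gaza killed"),
--     ("Santé",       "health hospital disease vaccine covid cancer treatment medical drug"),
--     ("Technologie", "ai technology data digital cyber software tech internet robot model"),
--     ("Climate",     "climate weather fire flood storm carbon energy environment pollution"),
--     ("Sport",       "game team player win match league championship olympic score"),
-- ]
--
-- _KW_INDEX = {w: i for i, pair in enumerate(_TABLE) for w in pair[1].split()}
--
--
-- def generate_interpretation(top_words: list[str], site_label: str) -> list[str]:
--     hit = set()
--     for w in top_words:
--         i = _KW_INDEX.get(w)
--         if i is not None:
--             hit.add(i)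
--     body = ["  • " + pair[0] for i, pair in enumerate(_TABLE) if i in hit]
--     if not body:
--         body = ["  • Sujets variés (aucun thème dominant identifié)"]
--     head = "Les actualités de " + site_label + " ce jour portent principalement sur :"
--     tail = ["",
--             "Cette analyse est basée sur la fréquence des mots dans les",
--             "titres et résumés des articles. Les résultats reflètent",
--             "les préoccupations éditoriales du site à ce moment précis."]
--     return [head, ""] + body + tail
-- ===== Notes on version B (the rewrite author's own statement) =====
-- stated objective: faster
-- what changed: A intersects each theme's keyword set with the whole top_words list; B stores keywords as one space-separated string per theme, builds an inverted keyword-to-theme-index dict once at module load, scans top_words a single time collecting hit indices into a set, and emits themes by filtering the enumerated table, with display labels stored pre-capitalized so no capitalize() pass is needed.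
import Mathlib
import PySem

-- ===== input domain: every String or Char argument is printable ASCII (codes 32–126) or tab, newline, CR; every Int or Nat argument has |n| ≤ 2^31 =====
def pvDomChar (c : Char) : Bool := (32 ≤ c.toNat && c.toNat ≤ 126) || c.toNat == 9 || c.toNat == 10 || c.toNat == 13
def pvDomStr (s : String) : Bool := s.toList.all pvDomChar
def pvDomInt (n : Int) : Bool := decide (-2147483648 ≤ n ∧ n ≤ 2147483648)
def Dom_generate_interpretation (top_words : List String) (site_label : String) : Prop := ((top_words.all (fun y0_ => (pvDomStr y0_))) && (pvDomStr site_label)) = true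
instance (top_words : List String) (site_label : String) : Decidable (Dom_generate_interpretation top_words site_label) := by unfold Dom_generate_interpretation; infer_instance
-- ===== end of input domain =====

set_option maxRecDepth 8000


-- B replaces A's per-theme set-intersection scans over top_words by an inverted
-- keyword→theme-index dict built once (keywords stored as one space-separated string per
-- theme), a single pass over top_words collecting hit indices, and an order-restoring filter
-- of the enumerated table (objective: faster, measured).

-- ===== PORT A =====
-- themes: Python dict of set literals, ported as an assoc list in source order; each set
-- literal is its distinct-element list (only membership of the sets is ever used).
def themesA : List (String × PySem.Set String) := [
  ("politique", ["government", "president", "minister", "party", "election", "vote", "senate", "congress", "parliament"]),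
  ("économie", ["economy", "market", "price", "inflation", "trade", "growth", "recession", "dollar", "bank", "stock"]),
  ("conflit", ["war", "attack", "military", "troops", "conflict", "ukraine", "russia", "israel", "gaza", "killed"]),
  ("santé", ["health", "hospital", "disease", "vaccine", "covid", "cancer", "treatment", "medical", "drug"]),
  ("technologie", ["ai", "technology", "data", "digital", "cyber", "software", "tech", "internet", "robot", "model"]),
  ("climate", ["climate", "weather", "fire", "flood", "storm", "carbon", "energy", "environment", "pollution"]),
  ("sport", ["game", "team", "player", "win", "match", "league", "championship", "olympic", "score"])]

-- Python str.capitalize(); exact on this file's theme-name constants (first char ASCII or 'é',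
-- remaining chars ASCII).
def capTheme (s : String) : String :=
  match s.toList with
  | [] => ""
  | c :: rest => String.ofList ((if c = 'é' then 'É' else c.toUpper) :: PySem.Chars.lower rest)

def generate_interpretation (top_words : List String) (site_label : String) : List String :=
  let detected := themesA.foldl
    (fun acc tk => if !(PySem.Set.inter tk.2 top_words).isEmpty then acc ++ [tk.1] else acc) []
  let lines := ["Les actualités de " ++ site_label ++ " ce jour portent principalement sur :", ""]
  let lines := if !detected.isEmpty then
      detected.foldl (fun ls t => ls ++ ["  • " ++ capTheme t]) lines
    else lines ++ ["  • Sujets variés (aucun thème dominant identifié)"]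
  lines ++ ["",
    "Cette analyse est basée sur la fréquence des mots dans les",
    "titres et résumés des articles. Les résultats reflètent",
    "les préoccupations éditoriales du site à ce moment précis."]

-- ===== PORT B =====
-- B's table: display label (pre-capitalized) with its keywords as ONE space-separated string.
def tableB : List (String × String) := [
  ("Politique", "government president minister party election vote senate congress parliament"),
  ("Économie", "economy market price inflation trade growth recession dollar bank stock"),
  ("Conflit", "war attack military troops conflict ukraine russia israel gaza killed"),
  ("Santé", "health hospital disease vaccine covid cancer treatment medical drug"),
  ("Technologie", "ai technology data digital cyber software tech internet robot model"),
  ("Climate", "climate weather fire flood storm carbon energy environment pollution"),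
  ("Sport", "game team player win match league championship olympic score")]

-- _KW_INDEX = {w: i for i, pair in enumerate(_TABLE) for w in pair[1].split()}
def kwIndex : PySem.Dict String Int :=
  (PySem.List.enumerate tableB).foldl
    (fun d ip => (PySem.Str.split₀ ip.2.2).foldl (fun d w => d.insert w ip.1) d)
    PySem.Dict.empty

def generate_interpretation_alt (top_words : List String) (site_label : String) : List String :=
  let hit : PySem.Set Int := top_words.foldl
    (fun s w => match kwIndex.get? w with | some i => PySem.Set.add s i | none => s)
    PySem.Set.empty
  let body0 := ((PySem.List.enumerate tableB).filter
      (fun ip => PySem.Set.contains hit ip.1)).map (fun ip => "  • " ++ ip.2.1)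
  let body := if body0.isEmpty then ["  • Sujets variés (aucun thème dominant identifié)"] else body0
  let head := "Les actualités de " ++ site_label ++ " ce jour portent principalement sur :"
  [head, ""] ++ body ++ ["",
    "Cette analyse est basée sur la fréquence des mots dans les",
    "titres et résumés des articles. Les résultats reflètent",
    "les préoccupations éditoriales du site à ce moment précis."]

-- ===== PRECONDITION & SPEC =====
def Spec_generate_interpretation (top_words : List String) (site_label : String) (out : List String) : Prop := out = generate_interpretation_alt top_words site_label
instance (top_words : List String) (site_label : String) (out : List String) : Decidable (Spec_generate_interpretation top_words site_label out) := by unfold Spec_generate_interpretation; infer_instance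

-- ===== CLAIM =====
def Claim_equal_generate_interpretation : Prop := ∀ (top_words : List String) (site_label : String), Dom_generate_interpretation top_words site_label → Spec_generate_interpretation top_words site_label (generate_interpretation top_words site_label)

-- ===== LEMMAS AND PROOFS =====

def bf (kws tw : List String) : Bool := tw.any (fun w => kws.contains w)

lemma condA (l t : List String) : (!(PySem.Set.inter l t).isEmpty) = bf l t := by
  rw [Bool.eq_iff_iff]
  simp [PySem.Set.inter, bf, List.isEmpty_eq_false_iff, List.any_eq_true]
  constructor
  · rintro ⟨a, ha, hc⟩; exact ⟨a, by simpa using hc, by simpa using ha⟩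
  · rintro ⟨a, ha, hc⟩; exact ⟨a, by simpa using hc, by simpa using ha⟩
lemma getMk (L : List (String × Int)) (hnd : (L.map Prod.fst).Nodup) (w : String) (i : Int) :
    ((PySem.Dict.mk L).get? w = some i) ↔ ∃ p ∈ L, p.1 = w ∧ p.2 = i := by
  induction L with
  | nil => simp [PySem.Dict.get?]
  | cons p rest ih =>
    simp only [List.map_cons, List.nodup_cons] at hnd
    rw [PySem.Dict.get?_mk_cons]
    by_cases h : p.1 = w
    · subst h
      simp only [BEq.rfl, if_true, List.mem_cons]
      constructor
      · rintro hv; exact ⟨p, Or.inl rfl, rfl, by simpa using hv⟩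
      · rintro ⟨q, hq | hq, h1, h2⟩
        · subst hq; simp [h2]
        · exact absurd (h1 ▸ List.mem_map_of_mem hq) hnd.1
    · have hb : (p.1 == w) = false := by simpa using h
      simp [hb, ih hnd.2, h, List.mem_cons]

def kwPairs : List (String × Int) := [("government", 0), ("president", 0), ("minister", 0), ("party", 0), ("election", 0), ("vote", 0), ("senate", 0), ("congress", 0), ("parliament", 0), ("economy", 1), ("market", 1), ("price", 1), ("inflation", 1), ("trade", 1), ("growth", 1), ("recession", 1), ("dollar", 1), ("bank", 1), ("stock", 1), ("war", 2), ("attack", 2), ("military", 2), ("troops", 2), ("conflict", 2), ("ukraine", 2), ("russia", 2), ("israel", 2), ("gaza", 2), ("killed", 2), ("health", 3), ("hospital", 3), ("disease", 3), ("vaccine", 3), ("covid", 3), ("cancer", 3), ("treatment", 3), ("medical", 3), ("drug", 3), ("ai", 4), ("technology", 4), ("data", 4), ("digital", 4), ("cyber", 4), ("software", 4), ("tech", 4), ("internet", 4), ("robot", 4), ("model", 4), ("climate", 5), ("weather", 5), ("fire", 5), ("flood", 5), ("storm", 5), ("carbon", 5), ("energy", 5), ("environment", 5), ("pollution", 5),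 ("game", 6), ("team", 6), ("player", 6), ("win", 6), ("match", 6), ("league", 6), ("championship", 6), ("olympic", 6), ("score", 6)]

lemma kwIndex_eq : kwIndex = PySem.Dict.mk kwPairs := by decide

lemma kwPairs_nodup : (kwPairs.map Prod.fst).Nodup := by decide

lemma mem_hit (tw : List String) (s : PySem.Set Int) (i : Int) :
    i ∈ (tw.foldl (fun s w => match kwIndex.get? w with | some t => PySem.Set.add s t | none => s) s)
      ↔ i ∈ s ∨ ∃ w ∈ tw, kwIndex.get? w = some i := by
  induction tw generalizing s with
  | nil => simp
  | cons w tw ih =>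
    simp only [List.foldl_cons]
    cases hk : kwIndex.get? w with
    | none => rw [ih]; simp [hk]
    | some t =>
      rw [ih]
      constructor
      · rintro (h | ⟨w', hw', h'⟩)
        · rcases (PySem.Set.mem_add _ _ _).1 h with h' | h'
          · exact Or.inl h'
          · exact Or.inr ⟨w, List.mem_cons_self, h' ▸ hk⟩
        · exact Or.inr ⟨w', List.mem_cons_of_mem _ hw', h'⟩
      · rintro (h | ⟨w', hw', h'⟩)
        · exact Or.inl ((PySem.Set.mem_add _ _ _).2 (Or.inl h))
        · rcases List.mem_cons.1 hw' with rfl | hw''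
          · rw [hk] at h'
            exact Or.inl ((PySem.Set.mem_add _ _ _).2 (Or.inr (Option.some.inj h').symm))
          · exact Or.inr ⟨w', hw'', h'⟩
lemma condB (tw : List String) (i : Int) (kws : List String)
    (hl : ∀ w, kwIndex.get? w = some i ↔ w ∈ kws) :
    PySem.Set.contains (tw.foldl
      (fun s w => match kwIndex.get? w with | some t => PySem.Set.add s t | none => s)
      PySem.Set.empty) i = bf kws tw := by
  rw [Bool.eq_iff_iff, PySem.Set.contains_iff, mem_hit]
  simp [bf, List.any_eq_true, hl]

lemma look0 (w : String) : kwIndex.get? w = some 0 ↔ w ∈ (["government", "president", "minister", "party", "election", "vote", "senate", "congress", "parliament"] : List String) := by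
  rw [kwIndex_eq, getMk kwPairs kwPairs_nodup]
  simp [kwPairs, eq_comm]
lemma look1 (w : String) : kwIndex.get? w = some 1 ↔ w ∈ (["economy", "market", "price", "inflation", "trade", "growth", "recession", "dollar", "bank", "stock"] : List String) := by
  rw [kwIndex_eq, getMk kwPairs kwPairs_nodup]
  simp [kwPairs, eq_comm]

lemma look2 (w : String) : kwIndex.get? w = some 2 ↔ w ∈ (["war", "attack", "military", "troops", "conflict", "ukraine", "russia", "israel", "gaza", "killed"] : List String) := by
  rw [kwIndex_eq, getMk kwPairs kwPairs_nodup]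
  simp [kwPairs, eq_comm]

lemma look3 (w : String) : kwIndex.get? w = some 3 ↔ w ∈ (["health", "hospital", "disease", "vaccine", "covid", "cancer", "treatment", "medical", "drug"] : List String) := by
  rw [kwIndex_eq, getMk kwPairs kwPairs_nodup]
  simp [kwPairs, eq_comm]

lemma look4 (w : String) : kwIndex.get? w = some 4 ↔ w ∈ (["ai", "technology", "data", "digital", "cyber", "software", "tech", "internet", "robot", "model"] : List String) := by
  rw [kwIndex_eq, getMk kwPairs kwPairs_nodup]
  simp [kwPairs, eq_comm]

lemma look5 (w : String) : kwIndex.get? w = some 5 ↔ w ∈ (["climate", "weather", "fire", "flood", "storm", "carbon", "energy", "environment", "pollution"] : List String) := by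
  rw [kwIndex_eq, getMk kwPairs kwPairs_nodup]
  simp [kwPairs, eq_comm]

lemma look6 (w : String) : kwIndex.get? w = some 6 ↔ w ∈ (["game", "team", "player", "win", "match", "league", "championship", "olympic", "score"] : List String) := by
  rw [kwIndex_eq, getMk kwPairs kwPairs_nodup]
  simp [kwPairs, eq_comm]

lemma henum : PySem.List.enumerate tableB = [((0 : Int), ("Politique", "government president minister party election vote senate congress parliament")), ((1 : Int), ("Économie", "economy market price inflation trade growth recession dollar bank stock")), ((2 : Int), ("Conflit", "war attack military troops conflict ukraine russia israel gaza killed")), ((3 : Int), ("Santé", "health hospital disease vaccine covid cancer treatment medical drug")), ((4 : Int), ("Technologie", "ai technology data digital cyber software tech internet robot model")), ((5 : Int), ("Climate", "climate weather fire flood storm carbon energy environment pollution")), ((6 : Int), ("Sport", "game team player win match league championship olympic score"))] := by decide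

lemma cap0 : capTheme "politique" = "Politique" := by decide
lemma cap1 : capTheme "économie" = "Économie" := by decide
lemma cap2 : capTheme "conflit" = "Conflit" := by decide
lemma cap3 : capTheme "santé" = "Santé" := by decide
lemma cap4 : capTheme "technologie" = "Technologie" := by decide
lemma cap5 : capTheme "climate" = "Climate" := by decide
lemma cap6 : capTheme "sport" = "Sport" := by decide

theorem ab_eq : ∀ (tw : List String) (s : String),
    generate_interpretation tw s = generate_interpretation_alt tw s := by
  intro tw s
  simp only [generate_interpretation, generate_interpretation_alt, themesA, henum,
    List.foldl_cons, List.foldl_nil, List.filter_cons, List.filter_nil, condA]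
  rw [condB tw 0 _ look0, condB tw 1 _ look1, condB tw 2 _ look2, condB tw 3 _ look3,
    condB tw 4 _ look4, condB tw 5 _ look5, condB tw 6 _ look6]
  cases hb0 : bf ["government", "president", "minister", "party", "election", "vote", "senate", "congress", "parliament"] tw <;>
    cases hb1 : bf ["economy", "market", "price", "inflation", "trade", "growth", "recession", "dollar", "bank", "stock"] tw <;>
    cases hb2 : bf ["war", "attack", "military", "troops", "conflict", "ukraine", "russia", "israel", "gaza", "killed"] tw <;>
    cases hb3 : bf ["health", "hospital", "disease", "vaccine", "covid", "cancer", "treatment", "medical", "drug"] tw <;>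
    cases hb4 : bf ["ai", "technology", "data", "digital", "cyber", "software", "tech", "internet", "robot", "model"] tw <;>
    cases hb5 : bf ["climate", "weather", "fire", "flood", "storm", "carbon", "energy", "environment", "pollution"] tw <;>
    cases hb6 : bf ["game", "team", "player", "win", "match", "league", "championship", "olympic", "score"] tw <;>
    simp [cap0, cap1, cap2, cap3, cap4, cap5, cap6]

-- ===== VERDICT =====
theorem generate_interpretation_spec : Claim_equal_generate_interpretation := by
  intro tw s _
  unfold Spec_generate_interpretation
  exact ab_eq tw s
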